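-- pv_equiv track=rewrite | github.com/hbirginie/bmx | main.py | generer_demi_et_consolantes
-- ===== SOURCE A (Python) =====
-- NB_QUALIFIES_PAR_RACE= 4
--
-- def fusionner_classés(listes):
--     fusion = []
--     max_len = max(len(liste) for liste in listes)
--
--     for i in range(max_len):
--         for liste in listes:
--             if i < len(liste):
--                 fusion.append(liste[i])
--     return fusion
--
-- def generer_demi_et_consolantes(res_qualifs):
--     demi1 = []
--     demi2 = []
--     consolante1 = []
--     consolante2 = []
--
--     nb_races = len(res_qualifs)
--     classement_qualif = fusionner_classés(res_qualifs)
--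
--     i = 0
--     while i < NB_QUALIFIES_PAR_RACE * nb_races:
--         if i % 2 == 0:
--             demi1.append(classement_qualif[i])
--         else:
--             demi2.append(classement_qualif[i])
--         i+=1
--
--     while i < len(classement_qualif):
--         if i % 2 == 0:
--             consolante1.append(classement_qualif[i])
--         else:
--             consolante2.append(classement_qualif[i])
--         i+=1
--
--     return demi1, demi2, consolante1, consolante2
-- ===== SOURCE B (Python) =====
-- NB_QUALIFIES_PAR_RACE = 4
-- _MISSING = object()
--
-- def generer_demi_et_consolantes(res_qualifs):
--     # round-robin merge with per-row iterators, dropping exhausted rows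
--     its = [iter(r) for r in res_qualifs]
--     merged = []
--     while its:
--         survivors = []
--         for it in its:
--             x = next(it, _MISSING)
--             if x is not _MISSING:
--                 merged.append(x)
--                 survivors.append(it)
--         its = survivors
--     # take exactly `semis` PAIRS of riders off the merged stream for the
--     # semifinals, then alternate the remaining riders into the consolations
--     semis = NB_QUALIFIES_PAR_RACE * len(res_qualifs) // 2
--     demi1, demi2, cons1, cons2 = [], [], [], []
--     stream = iter(merged)
--     for _ in range(semis):
--         demi1.append(next(stream))
--         demi2.append(next(stream))
--     for first in stream:
--         cons1.append(first)
--         second = next(stream, _MISSING)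
--         if second is not _MISSING:
--             cons2.append(second)
--     return demi1, demi2, cons1, cons2
-- ===== Notes on version B (the rewrite author's own statement) =====
-- stated objective: alternative
-- what changed: B merges by round-robin over per-row iterators that are dropped as they exhaust (no max-length index loop) and splits the merged stream by consuming it two riders at a time: exactly NB_QUALIFIES_PAR_RACE*len//2 pairs are taken strictly off the stream for the two semifinals, and the remaining riders are alternated into the two consolations, with no index arithmetic or parity test anywhere.
import Mathlib
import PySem

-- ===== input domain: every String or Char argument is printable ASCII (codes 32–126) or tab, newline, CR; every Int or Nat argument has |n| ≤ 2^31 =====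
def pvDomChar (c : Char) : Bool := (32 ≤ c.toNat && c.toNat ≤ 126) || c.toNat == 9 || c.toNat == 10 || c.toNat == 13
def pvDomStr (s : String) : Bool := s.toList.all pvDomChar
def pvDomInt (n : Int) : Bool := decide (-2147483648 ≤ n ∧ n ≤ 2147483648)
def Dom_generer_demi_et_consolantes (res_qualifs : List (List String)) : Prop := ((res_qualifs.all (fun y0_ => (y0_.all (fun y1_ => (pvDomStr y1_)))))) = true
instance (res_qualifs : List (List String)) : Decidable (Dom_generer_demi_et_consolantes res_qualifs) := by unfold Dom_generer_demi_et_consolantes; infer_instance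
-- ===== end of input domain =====

-- B merges by round-robin over per-row queues dropped as they empty and splits the merged
-- stream two riders at a time against a budget of semifinal pairs (no index arithmetic);
-- objective: alternative (same cost, different mechanism).

-- ===== PORT A =====
def pvNB_QUALIFIES_PAR_RACE : Int := 4

def fusionner_classes (listes : List (List String)) : List String :=
  -- max(len(liste) for liste in listes); none = ValueError on empty input (excluded by Pre_)
  match PySem.List.max? (listes.map (fun liste => (liste.length : Int))) id with
  | none => []
  | some max_len =>
    (PySem.List.pyRange 0 max_len 1).foldl
      (fun fusion i =>
        listes.foldl
          (fun fusion liste =>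
            if i < (liste.length : Int) then fusion ++ [PySem.List.pyGetD liste i ""] else fusion)
          fusion)
      []

def generer_demi_et_consolantes (res_qualifs : List (List String)) : List String × List String × List String × List String :=
  let nb_races : Int := res_qualifs.length
  let classement_qualif := fusionner_classes res_qualifs
  -- first while loop: i from 0 to NB_QUALIFIES_PAR_RACE * nb_races
  let p1 :=
    (PySem.List.pyRange 0 (pvNB_QUALIFIES_PAR_RACE * nb_races) 1).foldl
      (fun p i =>
        if PySem.Int.mod i 2 = 0 then (p.1 ++ [PySem.List.pyGetD classement_qualif i ""], p.2)
        else (p.1, p.2 ++ [PySem.List.pyGetD classement_qualif i ""]))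
      (([] : List String), ([] : List String))
  -- second while loop: i continues to len(classement_qualif)
  let p2 :=
    (PySem.List.pyRange (pvNB_QUALIFIES_PAR_RACE * nb_races) (classement_qualif.length : Int) 1).foldl
      (fun p i =>
        if PySem.Int.mod i 2 = 0 then (p.1 ++ [PySem.List.pyGetD classement_qualif i ""], p.2)
        else (p.1, p.2 ++ [PySem.List.pyGetD classement_qualif i ""]))
      (([] : List String), ([] : List String))
  (p1.1, p1.2, p2.1, p2.2)

-- ===== PORT B =====
-- one round of `for it in its: x = next(it, _MISSING) …`: heads appended, survivors kept
def pvNext (its : List (List String)) : List (List String) :=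
  its.filterMap (fun r => match r with | [] => none | _ :: xs => some xs)

def pvRowSize (its : List (List String)) : Nat := (its.map (fun r => r.length + 1)).sum

theorem pvNext_size_lt (its : List (List String)) (h : its ≠ []) :
    pvRowSize (pvNext its) < pvRowSize its := by
  have le : ∀ l : List (List String), pvRowSize (pvNext l) ≤ pvRowSize l := by
    intro l
    induction l with
    | nil => simp [pvNext, pvRowSize]
    | cons r rest ih =>
      cases r with
      | nil => simp only [pvNext, pvRowSize, List.filterMap_cons, List.map_cons, List.sum_cons] at *; omega
      | cons x xs => simp only [pvNext, pvRowSize, List.filterMap_cons, List.map_cons, List.sum_cons, List.length_cons] at *; omega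
  cases its with
  | nil => exact absurd rfl h
  | cons r rest =>
    have := le rest
    cases r with
    | nil => simp only [pvNext, pvRowSize, List.filterMap_cons, List.map_cons, List.sum_cons] at *; omega
    | cons x xs => simp only [pvNext, pvRowSize, List.filterMap_cons, List.map_cons, List.sum_cons, List.length_cons] at *; omega

-- the `while its:` loop of B
def mergeRR (its : List (List String)) (acc : List String) : List String :=
  if hnil : its = [] then acc
  else mergeRR (pvNext its) (acc ++ its.filterMap List.head?)
termination_by pvRowSize its
decreasing_by exact pvNext_size_lt its hnil

-- `for _ in range(semis): demi1.append(next(stream)); demi2.append(next(stream))`;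
-- where Python raises StopIteration (stream exhausted mid-semifinals, outside Pre_)
-- the port stops with what it has
def pvTakePairs : Nat → List String → List String → List String →
    List String × List String × List String
  | 0, rest, d1, d2 => (d1, d2, rest)
  | _ + 1, [], d1, d2 => (d1, d2, [])
  | _ + 1, [x], d1, d2 => (d1 ++ [x], d2, [])
  | k + 1, x :: y :: rest, d1, d2 => pvTakePairs k rest (d1 ++ [x]) (d2 ++ [y])

-- the `for first in stream:` consolation loop, consuming two riders at a time
def pvConsLoop : List String → List String → List String → List String × List String
  | [], c1, c2 => (c1, c2)
  | [x], c1, c2 => (c1 ++ [x], c2)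
  | x :: y :: rest, c1, c2 => pvConsLoop rest (c1 ++ [x]) (c2 ++ [y])

def generer_demi_et_consolantes_alt (res_qualifs : List (List String)) : List String × List String × List String × List String :=
  let merged := mergeRR res_qualifs []
  -- semis = NB_QUALIFIES_PAR_RACE * len(res_qualifs) // 2, a nonnegative count
  let semis : Nat := (PySem.Int.floordiv (4 * (res_qualifs.length : Int)) 2).toNat
  let (d1, d2, rest) := pvTakePairs semis merged [] []
  let (c1, c2) := pvConsLoop rest [] []
  (d1, d2, c1, c2)

-- ===== PRECONDITION & SPEC =====
-- Pre_ excludes the inputs on which A raises: the empty list (max() → ValueError) and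
-- inputs with fewer than 4*len(res_qualifs) merged entries (IndexError in the first loop).
def Pre_generer_demi_et_consolantes (res_qualifs : List (List String)) : Prop :=
  res_qualifs ≠ [] ∧ 4 * res_qualifs.length ≤ (res_qualifs.map List.length).sum
instance (res_qualifs : List (List String)) : Decidable (Pre_generer_demi_et_consolantes res_qualifs) := by unfold Pre_generer_demi_et_consolantes; infer_instance

def pvWitness_generer_demi_et_consolantes : List (List String) :=
  [["a1", "a2", "a3", "a4", "a5", "a6", "a7", "a8", "a9"],
   ["b1", "b2", "b3", "b4", "b5", "b6", "b7", "b8", "b9"]]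

def Spec_generer_demi_et_consolantes (res_qualifs : List (List String)) (out : List String × List String × List String × List String) : Prop := out = generer_demi_et_consolantes_alt res_qualifs
instance (res_qualifs : List (List String)) (out : List String × List String × List String × List String) : Decidable (Spec_generer_demi_et_consolantes res_qualifs out) := by unfold Spec_generer_demi_et_consolantes; infer_instance

-- ===== CLAIM (what is proved, stated in full; the proofs are below) =====
def Claim_equal_generer_demi_et_consolantes : Prop := ∀ (res_qualifs : List (List String)), Dom_generer_demi_et_consolantes res_qualifs → Pre_generer_demi_et_consolantes res_qualifs → Spec_generer_demi_et_consolantes res_qualifs (generer_demi_et_consolantes res_qualifs)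

-- ===== LEMMAS AND PROOFS =====

/-- Every other element of `xs` starting at index `a`, `c` of them (default `""`). -/
def pvPick (xs : List String) (a c : Nat) : List String :=
  (List.range c).map (fun k => xs.getD (a + 2 * k) "")

theorem pvPick_succ (xs : List String) (a c : Nat) :
    pvPick xs a (c + 1) = xs.getD a "" :: pvPick xs (a + 2) c := by
  simp [pvPick, List.range_succ_eq_map, List.map_map, Function.comp_def, Nat.mul_succ]
  intro k _
  rw [show a + (2 * k + 2) = a + 2 + 2 * k from by omega]

theorem pvPick_cons (x : String) (xs : List String) (a c : Nat) :
    pvPick (x :: xs) (a + 1) c = pvPick xs a c := by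
  unfold pvPick
  apply List.map_congr_left
  intro k _
  rw [show a + 1 + 2 * k = (a + 2 * k) + 1 from by omega]
  simp [List.getD]

/-- A's parity loop, started at an even index, splits into the two every-other-element lists. -/
theorem pvLoopA (xs : List String) :
    ∀ (n a : Nat) (d1 d2 : List String), a % 2 = 0 →
    (PySem.List.pyRange (a : Int) ((a : Int) + (n : Int)) 1).foldl
      (fun p i =>
        if PySem.Int.mod i 2 = 0 then (p.1 ++ [PySem.List.pyGetD xs i ""], p.2)
        else (p.1, p.2 ++ [PySem.List.pyGetD xs i ""]))
      (d1, d2)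
    = (d1 ++ pvPick xs a ((n + 1) / 2), d2 ++ pvPick xs (a + 1) (n / 2)) := by
  intro n
  induction n using Nat.strong_induction_on with
  | _ n ih =>
    intro a d1 d2 ha
    have hma : PySem.Int.mod ((a : Nat) : Int) 2 = ((a % 2 : Nat) : Int) := by
      exact_mod_cast PySem.Int.mod_natCast a 2
    have hmb : PySem.Int.mod (((a + 1 : Nat) : Nat) : Int) 2 = (((a + 1) % 2 : Nat) : Int) := by
      exact_mod_cast PySem.Int.mod_natCast (a + 1) 2
    match n with
    | 0 =>
      rw [PySem.List.pyRange_one_eq_nil (by omega)]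
      simp [pvPick]
    | 1 =>
      rw [show ((a : Int) + ((1 : Nat) : Int)) = (a : Int) + 1 from by push_cast; ring,
        PySem.List.pyRange_one_singleton]
      simp only [List.foldl_cons, List.foldl_nil, hma, ha]
      norm_num
      simp [pvPick]
    | (m + 2) =>
      have h1 : (a + 1) % 2 = 1 := by omega
      rw [PySem.List.pyRange_one_cons (by push_cast; omega),
        PySem.List.pyRange_one_cons (by push_cast; omega)]
      rw [show ((a : Int) + 1) = ((a + 1 : Nat) : Int) from by push_cast; ring]
      rw [show (((a + 1 : Nat) : Int) + 1) = ((a + 2 : Nat) : Int) from by push_cast; ring]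
      rw [show ((a : Int) + ((m + 2 : Nat) : Int)) = (((a + 2 : Nat) : Int) + ((m : Nat) : Int)) from by
        push_cast; ring]
      simp only [List.foldl_cons, hma, ha, hmb, h1, Nat.cast_zero, Nat.cast_one, reduceIte]
      rw [ih m (by omega) (a + 2) _ _ (by omega)]
      rw [show (m + 2 + 1) / 2 = (m + 1) / 2 + 1 from by omega,
        show (m + 2) / 2 = m / 2 + 1 from by omega,
        pvPick_succ, pvPick_succ]
      simp only [show a + 1 + 2 = a + 3 from by omega]
      simp [PySem.List.pyGetD_natCast]
      rw [show ((a : Int) + 1) = ((a + 1 : Nat) : Int) from by push_cast; ring,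
        PySem.List.pyGetD_natCast, List.getD_eq_getElem?_getD]

/-- A's inner merge loop collects exactly the in-range `i`-th elements, in order. -/
theorem pvInner (i : Int) (listes : List (List String)) (acc : List String) :
    listes.foldl
      (fun fusion liste =>
        if i < (liste.length : Int) then fusion ++ [PySem.List.pyGetD liste i ""] else fusion)
      acc
    = acc ++ listes.filterMap
        (fun l => if i < (l.length : Int) then some (PySem.List.pyGetD l i "") else none) := by
  induction listes generalizing acc with
  | nil => simp
  | cons l rest ih =>
    simp only [List.foldl_cons, List.filterMap_cons]
    by_cases h : i < (l.length : Int) <;> simp [h, ih]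

/-- The max row length, in Nat. -/
def pvM (its : List (List String)) : Nat := (its.map List.length).foldr max 0

/-- The common column-major specification of both merges. -/
def pvSpecNat (its : List (List String)) : List String :=
  (List.range (pvM its)).flatMap (fun i => its.filterMap (fun l => l[i]?))

theorem pvM_ub (its : List (List String)) : ∀ l ∈ its, l.length ≤ pvM its := by
  induction its with
  | nil => simp
  | cons r rest ih =>
    intro l hl
    rcases List.mem_cons.mp hl with h | h
    · subst h
      simp only [pvM, List.map_cons, List.foldr_cons]
      omega
    · have := ih l h
      simp only [pvM, List.map_cons, List.foldr_cons] at *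
      omega

theorem pvM_le (its : List (List String)) (b : Nat) (h : ∀ l ∈ its, l.length ≤ b) :
    pvM its ≤ b := by
  induction its with
  | nil => simp [pvM]
  | cons r rest ih =>
    have h1 := h r (by simp)
    have h2 := ih (fun l hl => h l (List.mem_cons_of_mem _ hl))
    simp only [pvM, List.map_cons, List.foldr_cons] at *
    omega

theorem pvM_zero (its : List (List String)) (h : pvM its = 0) : ∀ l ∈ its, l = [] := by
  intro l hl
  have := pvM_ub its l hl
  rw [h] at this
  exact List.length_eq_zero_iff.mp (by omega)

theorem pvM_next (its : List (List String)) : pvM (pvNext its) = pvM its - 1 := by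
  induction its with
  | nil => simp [pvM, pvNext]
  | cons r rest ih =>
    cases r with
    | nil =>
      simp only [pvM, pvNext, List.filterMap_cons, List.map_cons, List.foldr_cons,
        List.length_nil] at *
      omega
    | cons x xs =>
      simp only [pvM, pvNext, List.filterMap_cons, List.map_cons, List.foldr_cons,
        List.length_cons] at *
      omega

theorem pvCol_next (its : List (List String)) (i : Nat) :
    its.filterMap (fun l => l[i + 1]?) = (pvNext its).filterMap (fun l => l[i]?) := by
  induction its with
  | nil => rfl
  | cons r rest ih =>
    cases r with
    | nil => simpa [pvNext, List.filterMap_cons] using ih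
    | cons x xs => simp [pvNext, List.filterMap_cons, ih]

/-- Peeling one round off the column-major spec. -/
theorem pvSpecNat_step (its : List (List String)) :
    pvSpecNat its = its.filterMap List.head? ++ pvSpecNat (pvNext its) := by
  by_cases hM : pvM its = 0
  · have hall := pvM_zero its hM
    have h1 : its.filterMap List.head? = [] := by
      rw [List.filterMap_eq_nil_iff]
      intro l hl; rw [hall l hl]; rfl
    have h2 : pvNext its = [] := by
      rw [pvNext, List.filterMap_eq_nil_iff]
      intro l hl; rw [hall l hl]
    rw [h1, h2]
    simp [pvSpecNat, hM]
  · obtain ⟨m, hm⟩ : ∃ m, pvM its = m + 1 := ⟨pvM its - 1, by omega⟩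
    have hhead : its.filterMap (fun l => l[0]?) = its.filterMap List.head? := by
      apply List.filterMap_congr
      intro l _
      cases l <;> rfl
    rw [pvSpecNat, hm, List.range_succ_eq_map, List.flatMap_cons, hhead]
    congr 1
    rw [List.flatMap_def, List.map_map, pvSpecNat, pvM_next, hm]
    simp only [Nat.add_sub_cancel, List.flatMap_def]
    congr 1
    apply List.map_congr_left
    intro i _
    exact pvCol_next its i

/-- B's round-robin merge computes the column-major merge. -/
theorem pvMergeB (its : List (List String)) (acc : List String) :
    mergeRR its acc = acc ++ pvSpecNat its := by
  generalize hn : pvRowSize its = n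
  induction n using Nat.strong_induction_on generalizing its acc with
  | _ n ih =>
    by_cases h : its = []
    · subst h
      rw [mergeRR]
      simp [pvSpecNat, pvM]
    · rw [mergeRR, dif_neg h,
        ih _ (hn ▸ pvNext_size_lt its h) (pvNext its) _ rfl,
        List.append_assoc, ← pvSpecNat_step]

theorem pvM_eq (its : List (List String)) (mx : Int)
    (hm : PySem.List.max? (its.map (fun l => (l.length : Int))) id = some mx) :
    mx.toNat = pvM its := by
  have hmem := PySem.List.max?_mem hm
  have hmax := PySem.List.max?_isMax hm
  obtain ⟨l0, hl0, hval⟩ := List.mem_map.mp hmem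
  have h1 : mx.toNat ≤ pvM its := by
    have := pvM_ub its l0 hl0
    omega
  have h2 : pvM its ≤ mx.toNat := by
    apply pvM_le
    intro l hl
    have := hmax _ (List.mem_map_of_mem (f := fun l => (l.length : Int)) hl)
    simp only [id] at this
    omega
  omega

/-- A's merge computes the column-major merge too. -/
theorem pvMergeA (listes : List (List String)) :
    fusionner_classes listes = pvSpecNat listes := by
  unfold fusionner_classes
  cases hm : PySem.List.max? (listes.map (fun l => (l.length : Int))) id with
  | none =>
    have : listes = [] := by
      have := (PySem.List.max?_eq_none_iff _ _).mp hm
      simpa using this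
    subst this
    simp [pvSpecNat, pvM]
  | some mx =>
    simp only [pvInner, PySem.List.foldl_append_eq_flatMap, List.nil_append]
    rw [show mx = ((mx.toNat : Nat) : Int) from by
      have hmem := PySem.List.max?_mem hm
      obtain ⟨l0, _, hval⟩ := List.mem_map.mp hmem
      omega]
    rw [PySem.List.pyRange_zero_natCast, pvM_eq listes mx hm, pvSpecNat, List.flatMap_def,
      List.flatMap_def, List.map_map]
    congr 1
    apply List.map_congr_left
    intro i _
    apply List.filterMap_congr
    intro l _
    simp only [PySem.List.pyGetD_natCast]
    by_cases h : i < l.length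
    · rw [if_pos (by exact_mod_cast h), List.getElem?_eq_getElem h,
        List.getD_eq_getElem _ _ h]
    · rw [if_neg (by omega), List.getElem?_eq_none (by omega)]

theorem pvSumMin (m L : Nat) :
    ((List.range m).map (fun i => if i < L then 1 else 0)).sum = min L m := by
  induction m with
  | zero => simp
  | succ k ihk =>
    rw [List.range_succ, List.map_append, List.sum_append, ihk]
    by_cases h : k < L <;> simp [h] <;> omega

theorem pvSumL (listes : List (List String)) (m : Nat) (h : ∀ l ∈ listes, l.length ≤ m) :
    ((List.range m).map (fun i => listes.countP (fun l => decide (i < l.length)))).sum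
      = (listes.map List.length).sum := by
  induction listes with
  | nil => simp
  | cons l rest ih =>
    have hr := ih (fun x hx => h x (List.mem_cons_of_mem _ hx))
    simp only [List.countP_cons, List.map_cons, List.sum_cons]
    rw [List.sum_map_add, hr]
    simp only [decide_eq_true_eq]
    rw [pvSumMin]
    have : min l.length m = l.length := by
      have := h l (List.mem_cons_self)
      omega
    omega

/-- The merged list has one entry per rider: its length is the sum of the list lengths. -/
theorem pvMergeLen (listes : List (List String)) :
    (pvSpecNat listes).length = (listes.map List.length).sum := by
  rw [pvSpecNat, List.length_flatMap]
  simp only [List.length_filterMap_eq_countP]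
  have hfn : ∀ (k : Nat),
      (fun (l : List String) => (l[k]?).isSome) = (fun l => decide (k < l.length)) := by
    intro k; funext l
    by_cases hk : k < l.length <;> simp [hk]
  simp only [hfn]
  exact pvSumL listes (pvM listes) (pvM_ub listes)

/-- The elements of `xs` at even positions, and at odd positions. -/
def pvEvens : List String → List String
  | [] => []
  | [x] => [x]
  | x :: _ :: rest => x :: pvEvens rest

def pvOdds : List String → List String
  | [] => []
  | [_] => []
  | _ :: y :: rest => y :: pvOdds rest

theorem pvEvens_pick (xs : List String) : pvEvens xs = pvPick xs 0 ((xs.length + 1) / 2) := by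
  induction xs using pvEvens.induct with
  | case1 => simp [pvEvens, pvPick]
  | case2 x => simp [pvEvens, pvPick, List.range_succ]
  | case3 x y rest ih =>
    rw [pvEvens, ih]
    rw [show (x :: y :: rest).length = rest.length + 2 from by simp]
    rw [show (rest.length + 2 + 1) / 2 = (rest.length + 1) / 2 + 1 from by omega, pvPick_succ]
    rw [show (0 : Nat) + 2 = 1 + 1 from rfl, pvPick_cons, pvPick_cons]
    rfl

theorem pvOdds_pick (xs : List String) : pvOdds xs = pvPick xs 1 (xs.length / 2) := by
  induction xs using pvOdds.induct with
  | case1 => simp [pvOdds, pvPick]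
  | case2 x => simp [pvOdds, pvPick]
  | case3 x y rest ih =>
    rw [pvOdds, ih]
    rw [show (x :: y :: rest).length = rest.length + 2 from by simp]
    rw [show (rest.length + 2) / 2 = rest.length / 2 + 1 from by omega, pvPick_succ]
    rw [show (1 : Nat) + 2 = 2 + 1 from rfl, show (2 : Nat) + 1 = (1 + 1) + 1 from rfl,
      pvPick_cons, pvPick_cons]
    rfl

theorem pvPick_drop (xs : List String) (t a c : Nat) :
    pvPick (xs.drop t) a c = pvPick xs (t + a) c := by
  unfold pvPick
  apply List.map_congr_left
  intro k _
  rw [List.getD_eq_getElem?_getD, List.getD_eq_getElem?_getD, List.getElem?_drop]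
  rw [show t + (a + 2 * k) = t + a + 2 * k from by omega]

theorem pvPick_take (xs : List String) (t a c : Nat) (h : ∀ k < c, a + 2 * k < t) :
    pvPick (xs.take t) a c = pvPick xs a c := by
  unfold pvPick
  apply List.map_congr_left
  intro k hk
  rw [List.getD_eq_getElem?_getD, List.getD_eq_getElem?_getD,
    List.getElem?_take_of_lt (h k (List.mem_range.mp hk))]

/-- The strict pair-taking phase, when the stream is long enough. -/
theorem pvTakeChar (k : Nat) :
    ∀ (xs : List String) (d1 d2 : List String), 2 * k ≤ xs.length →
    pvTakePairs k xs d1 d2 =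
      (d1 ++ pvEvens (xs.take (2 * k)), d2 ++ pvOdds (xs.take (2 * k)), xs.drop (2 * k)) := by
  induction k with
  | zero => intro xs d1 d2 _; simp [pvTakePairs, pvEvens, pvOdds]
  | succ j ih =>
    intro xs d1 d2 hlen
    match xs with
    | [] => simp at hlen
    | [x] => simp at hlen; omega
    | x :: y :: rest =>
      rw [show 2 * (j + 1) = 2 * j + 2 from by omega] at *
      rw [pvTakePairs, ih rest (d1 ++ [x]) (d2 ++ [y]) (by simp at hlen; omega)]
      simp [pvEvens, pvOdds]

/-- The consolation loop alternates the remaining riders. -/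
theorem pvConsChar (xs : List String) :
    ∀ (c1 c2 : List String), pvConsLoop xs c1 c2 = (c1 ++ pvEvens xs, c2 ++ pvOdds xs) := by
  induction xs using pvEvens.induct with
  | case1 => intro c1 c2; simp [pvConsLoop, pvEvens, pvOdds]
  | case2 x => intro c1 c2; simp [pvConsLoop, pvEvens, pvOdds]
  | case3 x y rest ih =>
    intro c1 c2
    rw [pvConsLoop, ih]
    simp [pvEvens, pvOdds]

-- ===== VERDICT (by name: the statement is the Claim_ definition above) =====
theorem generer_demi_et_consolantes_spec : Claim_equal_generer_demi_et_consolantes := by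
  intro rq hDom hPre
  obtain ⟨hne, hle⟩ := hPre
  unfold Spec_generer_demi_et_consolantes
  set xs := pvSpecNat rq with hxs
  set t := 4 * rq.length with ht
  have hlen : xs.length = (rq.map List.length).sum := pvMergeLen rq
  have htle : t ≤ xs.length := by omega
  unfold generer_demi_et_consolantes generer_demi_et_consolantes_alt
  dsimp only
  rw [pvMergeA, pvMergeB, List.nil_append, ← hxs]
  simp only [pvNB_QUALIFIES_PAR_RACE]
  rw [show (4 * (rq.length : Int)) = ((t : Nat) : Int) from by push_cast [ht]; ring]
  rw [show (PySem.Int.floordiv ((t : Nat) : Int) 2).toNat = 2 * rq.length from by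
    rw [PySem.Int.floordiv_eq_ediv_of_pos (by norm_num)]
    push_cast [ht]
    omega]
  have hA1 := pvLoopA xs t 0 [] [] (by omega)
  have hA2 := pvLoopA xs (xs.length - t) t [] [] (by omega)
  rw [show ((t : Int) + ((xs.length - t : Nat) : Int)) = ((xs.length : Nat) : Int) from by
    push_cast [Nat.cast_sub htle]; ring] at hA2
  simp only [Nat.cast_zero, zero_add, List.nil_append] at hA1 hA2
  rw [hA1, hA2, pvTakeChar (2 * rq.length) xs [] [] (by omega)]
  rw [show 2 * (2 * rq.length) = t from by omega, pvConsChar]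
  have hlt : (xs.take t).length = t := by simp; omega
  rw [pvEvens_pick, pvOdds_pick, pvEvens_pick, pvOdds_pick, hlt,
    List.length_drop, pvPick_drop, pvPick_drop,
    pvPick_take xs t 0 ((t + 1) / 2) (by intro k hk; omega),
    pvPick_take xs t 1 (t / 2) (by intro k hk; omega)]
  simp only [List.nil_append, Nat.add_zero]
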